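-- pv_equiv track=rewrite | github.com/fisher458/TwiceSignal | src/signaltwice/task/visualizer.py | _others_label
-- ===== SOURCE A (Python) =====
-- from typing import Any, Callable, Dict, Iterable, Iterator, Mapping, Sequence, Tuple, Type
--
-- def _others_label(existing_labels: Sequence[str]) -> str:
--     base_label = "Others"
--     if base_label not in existing_labels:
--         return base_label
--     counter = 1
--     candidate = f"{base_label} ({counter})"
--     while candidate in existing_labels:
--         counter += 1
--         candidate = f"{base_label} ({counter})"
--     return candidate
-- ===== SOURCE B (Python) =====
-- def _parse_index(label):
--     """Return n if label is exactly f"Others ({n})" for a canonically written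
--     nonnegative integer n, else None."""
--     if label.startswith("Others (") and label.endswith(")"):
--         digits = label[8:-1]
--         if digits.isdigit():
--             n = 0
--             for c in digits:
--                 n = n * 10 + (ord(c) - 48)
--             if f"Others ({n})" == label:
--                 return n
--     return None
--
--
-- def _others_label(existing_labels):
--     base_used = False
--     used = set()
--     for label in existing_labels:
--         if label == "Others":
--             base_used = True
--         else:
--             n = _parse_index(label)
--             if n is not None:
--                 used.add(n)
--     if not base_used:
--         return "Others"
--     return next(f"Others ({n})" for n in range(1, len(used) + 2) if n not in used)
-- ===== Notes on version B (the rewrite author's own statement) =====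
-- stated objective: alternative
-- what changed: A probes candidate strings "Others (1)", "Others (2)", ... with an unbounded while-loop doing a linear list scan per probe; B makes one parsing pass that collects the taken indices of exact "Others (n)" labels into a set and then does a bounded gap scan over range(1, len(used)+2).
import Mathlib
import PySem

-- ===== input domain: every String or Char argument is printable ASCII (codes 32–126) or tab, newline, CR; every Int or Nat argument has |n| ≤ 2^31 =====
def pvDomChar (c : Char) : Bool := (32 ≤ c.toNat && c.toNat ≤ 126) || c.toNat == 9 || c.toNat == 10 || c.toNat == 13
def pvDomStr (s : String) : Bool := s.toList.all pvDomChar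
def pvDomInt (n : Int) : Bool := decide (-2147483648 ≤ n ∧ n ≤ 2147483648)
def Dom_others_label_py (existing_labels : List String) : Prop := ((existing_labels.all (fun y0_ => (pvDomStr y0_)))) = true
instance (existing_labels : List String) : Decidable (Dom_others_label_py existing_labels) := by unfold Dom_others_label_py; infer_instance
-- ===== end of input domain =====

-- B replaces A's unbounded generate-and-test while-loop by one parsing pass that
-- collects the taken indices n of exact "Others (n)" labels into a set, then a
-- bounded gap scan over range(1, len(used)+2); objective: alternative.

-- ===== PORT A =====
-- f"Others ({counter})"
def pvCandA (counter : Int) : String :=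
  String.ofList ("Others (".toList ++ PySem.Int.toChars counter ++ [')'])

-- the while-loop; fuel existing_labels.length + 1 always suffices (proved below:
-- among the first length+1 candidates one is free), so the fuel-0 branch is unreachable
def pvLoopA (existing_labels : List String) : Nat → Int → String
  | 0, counter => pvCandA counter
  | fuel+1, counter =>
    if existing_labels.contains (pvCandA counter) then
      pvLoopA existing_labels fuel (counter + 1)
    else pvCandA counter

def others_label_py (existing_labels : List String) : String :=
  if !(existing_labels.contains "Others") then "Others"
  else pvLoopA existing_labels (existing_labels.length + 1) 1

-- ===== PORT B =====
-- the digit-accumulation loop 'n = n * 10 + (ord(c) - 48)'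
def pvDigitVal (cs : List Char) : Int :=
  cs.foldl (fun n c => n * 10 + ((c.toNat : Int) - 48)) 0

-- _parse_index(label)
def pvParseIndex (label : String) : Option Int :=
  if PySem.Str.startswith label "Others (" && PySem.Str.endswith label ")" then
    let digits := PySem.Str.slice label (some 8) (some (-1))
    if PySem.Str.strIsdigit digits then
      let n := pvDigitVal digits.toList
      if String.ofList ("Others (".toList ++ PySem.Int.toChars n ++ [')']) == label then
        some n
      else none
    else none
  else none

-- one iteration of the collecting pass (state: base_used flag, used set)
def pvScanB (st : Bool × PySem.Set Int) (label : String) : Bool × PySem.Set Int :=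
  if label == "Others" then (true, st.2)
  else
    match pvParseIndex label with
    | some n => (st.1, PySem.Set.add st.2 n)
    | none => st

def others_label_py_alt (existing_labels : List String) : String :=
  let st := existing_labels.foldl pvScanB (false, PySem.Set.empty)
  if !st.1 then "Others"
  else
    match (PySem.List.pyRange 1 ((st.2.length : Int) + 2) 1).find?
        (fun n => !(PySem.Set.contains st.2 n)) with
    | some n => String.ofList ("Others (".toList ++ PySem.Int.toChars n ++ [')'])
    | none => "Others"   -- unreachable: next() always finds a gap (proved below)

-- ===== PRECONDITION & SPEC =====
def Spec_others_label_py (existing_labels : List String) (out : String) : Prop := out = others_label_py_alt existing_labels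
instance (existing_labels : List String) (out : String) : Decidable (Spec_others_label_py existing_labels out) := by unfold Spec_others_label_py; infer_instance

-- ===== CLAIM (what is proved, stated in full; the proofs are below) =====
def Claim_equal_others_label_py : Prop := ∀ (existing_labels : List String), Dom_others_label_py existing_labels → Spec_others_label_py existing_labels (others_label_py existing_labels)

-- ===== LEMMAS AND PROOFS =====

theorem pv_tdc_shift (f : Nat) : ∀ (n : Nat) (acc : List Char),
    Nat.toDigitsCore 10 f n acc = Nat.toDigitsCore 10 f n [] ++ acc := by
  induction f with
  | zero => intro n acc; simp [Nat.toDigitsCore]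
  | succ f ih =>
    intro n acc
    simp only [Nat.toDigitsCore]
    by_cases h : n / 10 = 0
    · simp [h]
    · simp only [h, if_false]
      rw [ih (n / 10) (Nat.digitChar (n % 10) :: acc), ih (n / 10) [Nat.digitChar (n % 10)]]
      simp

theorem pv_tdc_fuel (n : Nat) : ∀ (f f' : Nat), n < f → n < f' →
    Nat.toDigitsCore 10 f n [] = Nat.toDigitsCore 10 f' n [] := by
  induction n using Nat.strong_induction_on with
  | _ n ih =>
    intro f f' hf hf'
    match f, f' with
    | g + 1, g' + 1 =>
      simp only [Nat.toDigitsCore]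
      by_cases h : n / 10 = 0
      · simp [h]
      · simp only [h, if_false]
        rw [pv_tdc_shift g, pv_tdc_shift g']
        have hn : 0 < n := by
          rcases Nat.eq_zero_or_pos n with h0 | h0
          · exact absurd (by simp [h0]) h
          · exact h0
        have hlt : n / 10 < n := Nat.div_lt_self hn (by norm_num)
        rw [ih (n / 10) hlt g g' (by omega) (by omega)]

theorem pv_toDigits_lt {m : Nat} (h : m < 10) : Nat.toDigits 10 m = [Nat.digitChar m] := by
  have hd : m / 10 = 0 := Nat.div_eq_of_lt h
  have hm : m % 10 = m := Nat.mod_eq_of_lt h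
  simp [Nat.toDigits, Nat.toDigitsCore, hd, hm]

theorem pv_toDigits_ge {m : Nat} (h : 10 ≤ m) :
    Nat.toDigits 10 m = Nat.toDigits 10 (m / 10) ++ [Nat.digitChar (m % 10)] := by
  have hd : m / 10 ≠ 0 := by
    have : 1 ≤ m / 10 := Nat.le_div_iff_mul_le (by norm_num) |>.mpr (by omega)
    omega
  show Nat.toDigitsCore 10 (m + 1) m [] = _
  simp only [Nat.toDigitsCore, hd, if_false]
  rw [pv_tdc_shift]
  have hlt : m / 10 < m := Nat.div_lt_self (by omega) (by norm_num)
  rw [pv_tdc_fuel (m / 10) m (m / 10 + 1) (by omega) (by omega)]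
  rfl

theorem pv_digitChar_toNat {r : Nat} (h : r < 10) : (Nat.digitChar r).toNat = 48 + r := by
  interval_cases r <;> decide

theorem pv_digitVal_toDigits (m : Nat) : pvDigitVal (Nat.toDigits 10 m) = (m : Int) := by
  induction m using Nat.strong_induction_on with
  | _ m ih =>
    by_cases h : m < 10
    · rw [pv_toDigits_lt h]
      simp [pvDigitVal, pv_digitChar_toNat h]
    · rw [pv_toDigits_ge (by omega)]
      have hlt : m / 10 < m := Nat.div_lt_self (by omega) (by norm_num)
      have := ih (m / 10) hlt
      simp only [pvDigitVal, List.foldl_append, List.foldl_cons, List.foldl_nil] at *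
      rw [this, pv_digitChar_toNat (Nat.mod_lt m (by norm_num))]
      push_cast
      omega

theorem pv_toDigits_isdigit (m : Nat) : ∀ c ∈ Nat.toDigits 10 m, PySem.Chars.isdigit c = true := by
  induction m using Nat.strong_induction_on with
  | _ m ih =>
    intro c hc
    by_cases h : m < 10
    · rw [pv_toDigits_lt h] at hc
      simp at hc; subst hc
      interval_cases m <;> decide
    · rw [pv_toDigits_ge (by omega)] at hc
      rcases List.mem_append.mp hc with hc | hc
      · exact ih (m / 10) (Nat.div_lt_self (by omega) (by norm_num)) c hc
      · simp at hc; subst hc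
        have : m % 10 < 10 := Nat.mod_lt m (by norm_num)
        interval_cases h : m % 10 <;> decide

theorem pv_toDigits_ne_nil (m : Nat) : Nat.toDigits 10 m ≠ [] := by
  by_cases h : m < 10
  · rw [pv_toDigits_lt h]; simp
  · rw [pv_toDigits_ge (by omega)]; simp

theorem pv_slice_mid (mid : List Char) :
    PySem.List.slice ("Others (".toList ++ mid ++ [')']) (some 8) (some (-1)) = mid := by
  have hlen : ("Others (".toList ++ mid ++ [')']).length = 9 + mid.length := by
    simp; omega
  have ha : PySem.List.clampIdx (9 + mid.length) 8 = 8 := by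
    rw [PySem.List.clampIdx]; split_ifs <;> omega
  have hb : PySem.List.clampIdx (9 + mid.length) (-1) = 8 + mid.length := by
    rw [PySem.List.clampIdx]; split_ifs <;> omega
  simp only [PySem.List.slice, hlen, ha, hb]
  have hdrop : List.drop 8 ("Others (".toList ++ mid ++ [')']) = mid ++ [')'] := by
    rw [List.append_assoc, List.drop_append_of_le_length (by decide)]
    simp
  rw [show 8 + mid.length - 8 = mid.length from by omega, hdrop]
  simp

theorem pv_parse_cand {n : Int} (h : 1 ≤ n) : pvParseIndex (pvCandA n) = some n := by
  have hchars : PySem.Int.toChars n = Nat.toDigits 10 n.toNat := by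
    simp [PySem.Int.toChars, show ¬ n < 0 by omega]
  have hstart : PySem.Str.startswith (pvCandA n) "Others (" = true := by
    rw [PySem.Str.startswith, pvCandA, String.toList_ofList, PySem.Chars.startswith_iff]
    exact ⟨PySem.Int.toChars n ++ [')'], by simp⟩
  have hend : PySem.Str.endswith (pvCandA n) ")" = true := by
    rw [PySem.Str.endswith, pvCandA, String.toList_ofList, PySem.Chars.endswith_iff]
    exact ⟨"Others (".toList ++ PySem.Int.toChars n, by simp⟩
  have hslice : (PySem.Str.slice (pvCandA n) (some 8) (some (-1))).toList = PySem.Int.toChars n := by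
    rw [PySem.Str.slice, String.toList_ofList, pvCandA, String.toList_ofList,
      PySem.Chars.slice_eq_listSlice, pv_slice_mid]
  have hdig : PySem.Str.strIsdigit (PySem.Str.slice (pvCandA n) (some 8) (some (-1))) = true := by
    rw [PySem.Str.strIsdigit, hslice, hchars, PySem.Chars.strIsdigit]
    simp [pv_toDigits_ne_nil, List.all_eq_true]
    exact pv_toDigits_isdigit n.toNat
  have hval : pvDigitVal (PySem.Str.slice (pvCandA n) (some 8) (some (-1))).toList = n := by
    rw [hslice, hchars, pv_digitVal_toDigits]; omega
  rw [pvParseIndex]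
  rw [hstart, hend]
  simp only [Bool.and_self, if_true]
  rw [hdig]
  simp only [if_true, hval]
  rw [show String.ofList ("Others (".toList ++ PySem.Int.toChars n ++ [')']) = pvCandA n from rfl]
  simp

theorem pv_parse_eq_some {label : String} {n : Int} (h : pvParseIndex label = some n) :
    label = pvCandA n := by
  rw [pvParseIndex] at h
  by_cases h1 : (PySem.Str.startswith label "Others (" && PySem.Str.endswith label ")") = true
  · rw [h1] at h
    simp only [if_true] at h
    by_cases h2 : PySem.Str.strIsdigit (PySem.Str.slice label (some 8) (some (-1))) = true
    · rw [h2] at h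
      simp only [if_true] at h
      by_cases h3 : (String.ofList ("Others (".toList ++
          PySem.Int.toChars (pvDigitVal (PySem.Str.slice label (some 8) (some (-1))).toList) ++ [')']) == label) = true
      · rw [if_pos h3] at h
        have hn : pvDigitVal (PySem.Str.slice label (some 8) (some (-1))).toList = n :=
          Option.some.inj h
        rw [hn] at h3
        have := eq_of_beq h3
        rw [← this, pvCandA]
      · rw [if_neg h3] at h; exact absurd h (by simp)
    · rw [if_neg h2] at h; exact absurd h (by simp)
  · rw [if_neg h1] at h; exact absurd h (by simp)

theorem pv_cand_inj {n m : Int} (hn : 1 ≤ n) (hm : 1 ≤ m) (h : pvCandA n = pvCandA m) : n = m := by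
  have h1 := pv_parse_cand hn
  have h2 := pv_parse_cand hm
  rw [h] at h1
  rw [h2] at h1
  exact (Option.some.inj h1).symm

theorem pv_scan_fst (ls : List String) : ∀ (b : Bool) (s : PySem.Set Int),
    (ls.foldl pvScanB (b, s)).1 = (b || ls.contains "Others") := by
  induction ls with
  | nil => intro b s; simp
  | cons l ls ih =>
    intro b s
    simp only [List.foldl_cons, List.contains_cons]
    rw [pvScanB]
    by_cases hl : (l == "Others") = true
    · rw [if_pos hl, ih]
      have : ("Others" == l) = true := by
        have := eq_of_beq hl; subst this; rfl
      simp [this]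
    · rw [if_neg (by simp_all)]
      have hol : ("Others" == l) = false := by
        apply beq_eq_false_iff_ne.mpr
        intro hEq; exact hl (by subst hEq; rfl)
      cases hp : pvParseIndex l with
      | some n => simp [ih, hol]
      | none => simp [ih, hol]

theorem pv_scan_snd_mem (ls : List String) : ∀ (b : Bool) (s : PySem.Set Int) (n : Int),
    n ∈ (ls.foldl pvScanB (b, s)).2 ↔ n ∈ s ∨ ∃ l ∈ ls, pvParseIndex l = some n := by
  induction ls with
  | nil => intro b s n; simp
  | cons l ls ih =>
    intro b s n
    simp only [List.foldl_cons, List.mem_cons]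
    rw [pvScanB]
    by_cases hl : (l == "Others") = true
    · rw [if_pos hl, ih]
      have hne : pvParseIndex l = none := by
        rw [eq_of_beq hl]
        rfl
      constructor
      · rintro (h | h)
        · exact Or.inl h
        · rcases h with ⟨l', hl', hp⟩
          exact Or.inr ⟨l', Or.inr hl', hp⟩
      · rintro (h | ⟨l', hl', hp⟩)
        · exact Or.inl h
        · rcases hl' with rfl | hl'
          · rw [hne] at hp; cases hp
          · exact Or.inr ⟨l', hl', hp⟩
    · rw [if_neg hl]
      cases hp : pvParseIndex l with
      | some m =>
        simp only [ih, PySem.Set.mem_add]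
        constructor
        · rintro ((h | rfl) | h)
          · exact Or.inl h
          · exact Or.inr ⟨l, Or.inl rfl, hp⟩
          · rcases h with ⟨l', hl', hp'⟩
            exact Or.inr ⟨l', Or.inr hl', hp'⟩
        · rintro (h | ⟨l', hl', hp'⟩)
          · exact Or.inl (Or.inl h)
          · rcases hl' with rfl | hl'
            · rw [hp] at hp'
              exact Or.inl (Or.inr (Option.some.inj hp').symm)
            · exact Or.inr ⟨l', hl', hp'⟩
      | none =>
        rw [ih]
        constructor
        · rintro (h | ⟨l', hl', hp'⟩)
          · exact Or.inl h
          · exact Or.inr ⟨l', Or.inr hl', hp'⟩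
        · rintro (h | ⟨l', hl', hp'⟩)
          · exact Or.inl h
          · rcases hl' with rfl | hl'
            · rw [hp] at hp'; cases hp'
            · exact Or.inr ⟨l', hl', hp'⟩

theorem pv_scan_snd_nodup (ls : List String) : ∀ (b : Bool) (s : PySem.Set Int),
    s.Nodup → (ls.foldl pvScanB (b, s)).2.Nodup := by
  induction ls with
  | nil => intro b s hs; exact hs
  | cons l ls ih =>
    intro b s hs
    simp only [List.foldl_cons]
    rw [pvScanB]
    by_cases hl : (l == "Others") = true
    · rw [if_pos hl]; exact ih _ _ hs
    · rw [if_neg hl]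
      cases hp : pvParseIndex l with
      | some m => exact ih _ _ (PySem.Set.nodup_add _ _ hs)
      | none => exact ih _ _ hs

theorem pv_used_sub (labels : List String) (n : Int)
    (h : n ∈ (labels.foldl pvScanB (false, PySem.Set.empty)).2) : pvCandA n ∈ labels := by
  rcases (pv_scan_snd_mem labels false PySem.Set.empty n).mp h with h | ⟨l, hl, hp⟩
  · cases h
  · rw [pv_parse_eq_some hp] at hl; exact hl

theorem pv_used_sup (labels : List String) (n : Int) (h1 : 1 ≤ n) (h : pvCandA n ∈ labels) :
    n ∈ (labels.foldl pvScanB (false, PySem.Set.empty)).2 := by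
  exact (pv_scan_snd_mem labels false PySem.Set.empty n).mpr
    (Or.inr ⟨pvCandA n, h, pv_parse_cand h1⟩)

theorem pv_pigeonInt (U : List Int) (hU : U.Nodup) (K : Nat)
    (h : ∀ j : Nat, j ≤ K → (1 + (j : Int)) ∈ U) : K + 1 ≤ U.length := by
  have hinj : Function.Injective (fun j : Nat => 1 + (j : Int)) := by
    intro a b hab
    simp only at hab
    omega
  have hnd : ((List.range (K + 1)).map (fun j : Nat => 1 + (j : Int))).Nodup :=
    List.Nodup.map hinj List.nodup_range
  have hsub : ((List.range (K + 1)).map (fun j : Nat => 1 + (j : Int))).toFinset ⊆ U.toFinset := by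
    intro x hx
    simp only [List.mem_toFinset, List.mem_map, List.mem_range] at hx
    rcases hx with ⟨j, hj, rfl⟩
    exact List.mem_toFinset.mpr (h j (by omega))
  have h1 : ((List.range (K + 1)).map (fun j : Nat => 1 + (j : Int))).toFinset.card = K + 1 := by
    rw [List.toFinset_card_of_nodup hnd]; simp
  have h2 : U.toFinset.card = U.length := List.toFinset_card_of_nodup hU
  calc K + 1 = _ := h1.symm
    _ ≤ U.toFinset.card := Finset.card_le_card hsub
    _ = U.length := h2

theorem pv_pigeonStr (xs : List String) (K : Nat)
    (h : ∀ j : Nat, j ≤ K → pvCandA (1 + (j : Int)) ∈ xs) : K + 1 ≤ xs.length := by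
  have hinj : Function.Injective (fun j : Nat => pvCandA (1 + (j : Int))) := by
    intro a b hab
    simp only at hab
    have : (1 : Int) + a = 1 + b := pv_cand_inj (by omega) (by omega) hab
    omega
  have hnd : ((List.range (K + 1)).map (fun j : Nat => pvCandA (1 + (j : Int)))).Nodup :=
    List.Nodup.map hinj List.nodup_range
  have hsub : ((List.range (K + 1)).map (fun j : Nat => pvCandA (1 + (j : Int)))).toFinset ⊆ xs.toFinset := by
    intro x hx
    simp only [List.mem_toFinset, List.mem_map, List.mem_range] at hx
    rcases hx with ⟨j, hj, rfl⟩
    exact List.mem_toFinset.mpr (h j (by omega))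
  have h1 : ((List.range (K + 1)).map (fun j : Nat => pvCandA (1 + (j : Int)))).toFinset.card = K + 1 := by
    rw [List.toFinset_card_of_nodup hnd]; simp
  calc K + 1 = _ := h1.symm
    _ ≤ xs.toFinset.card := Finset.card_le_card hsub
    _ ≤ xs.length := List.toFinset_card_le xs

theorem pv_loopA_eq (labels : List String) : ∀ (fuel : Nat) (c : Int)
    (h : ∃ j : Nat, pvCandA (c + (j : Int)) ∉ labels), Nat.find h < fuel →
    pvLoopA labels fuel c = pvCandA (c + (Nat.find h : Int)) := by
  intro fuel
  induction fuel with
  | zero => intro c h hlt; omega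
  | succ fuel ih =>
    intro c h hlt
    rw [pvLoopA]
    by_cases hc : labels.contains (pvCandA c) = true
    · rw [if_pos hc]
      have hmem : pvCandA c ∈ labels := by simpa using hc
      have hf0 : Nat.find h ≠ 0 := by
        intro h0
        have hs := Nat.find_spec h
        rw [h0] at hs
        simp only [Nat.cast_zero, add_zero] at hs
        exact hs hmem
      obtain ⟨k, hk⟩ := Nat.exists_eq_succ_of_ne_zero hf0
      have h' : ∃ j : Nat, pvCandA ((c + 1) + (j : Int)) ∉ labels := by
        refine ⟨k, ?_⟩
        have hs := Nat.find_spec h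
        rw [hk] at hs
        have : c + ((k + 1 : Nat) : Int) = (c + 1) + (k : Int) := by push_cast; omega
        rwa [this] at hs
      have hfind' : Nat.find h' = k := by
        rw [Nat.find_eq_iff]
        constructor
        · have hs := Nat.find_spec h
          rw [hk] at hs
          have : c + ((k + 1 : Nat) : Int) = (c + 1) + (k : Int) := by push_cast; omega
          rwa [this] at hs
        · intro i hik
          have := Nat.find_min h (show i + 1 < Nat.find h by omega)
          simp only [not_not] at this ⊢
          have harg : c + ((i + 1 : Nat) : Int) = (c + 1) + (i : Int) := by push_cast; omega
          rwa [harg] at this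
      rw [ih (c + 1) h' (by omega), hfind', hk]
      congr 1
      push_cast
      omega
    · rw [if_neg hc]
      have hnm : pvCandA c ∉ labels := by simpa using hc
      have hf0 : Nat.find h = 0 := by
        rw [Nat.find_eq_zero]
        simpa using hnm
      rw [hf0]
      simp

theorem pv_findRange_eq (q : Int → Bool) : ∀ (t : Nat) (a b : Int)
    (h : ∃ j : Nat, q (a + (j : Int)) = true), (b - a).toNat = t →
    a + (Nat.find h : Int) < b →
    (PySem.List.pyRange a b 1).find? q = some (a + (Nat.find h : Int)) := by
  intro t
  induction t with
  | zero =>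
    intro a b h ht hlt
    have : (0 : Int) ≤ (Nat.find h : Int) := by positivity
    omega
  | succ t ih =>
    intro a b h ht hlt
    have hab : a < b := by
      have : (0 : Int) ≤ (Nat.find h : Int) := by positivity
      omega
    rw [PySem.List.pyRange_one_cons hab]
    by_cases hqa : q a = true
    · have hf0 : Nat.find h = 0 := by
        rw [Nat.find_eq_zero]
        simpa using hqa
      rw [List.find?_cons_of_pos hqa, hf0]
      simp
    · rw [List.find?_cons_of_neg hqa]
      have hf0 : Nat.find h ≠ 0 := by
        intro h0
        have hs := Nat.find_spec h
        rw [h0] at hs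
        simp only [Nat.cast_zero, add_zero] at hs
        exact hqa hs
      obtain ⟨k, hk⟩ := Nat.exists_eq_succ_of_ne_zero hf0
      have h' : ∃ j : Nat, q ((a + 1) + (j : Int)) = true := by
        refine ⟨k, ?_⟩
        have hs := Nat.find_spec h
        rw [hk] at hs
        have : a + ((k + 1 : Nat) : Int) = (a + 1) + (k : Int) := by push_cast; omega
        rwa [this] at hs
      have hfind' : Nat.find h' = k := by
        rw [Nat.find_eq_iff]
        constructor
        · have hs := Nat.find_spec h
          rw [hk] at hs
          have : a + ((k + 1 : Nat) : Int) = (a + 1) + (k : Int) := by push_cast; omega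
          rwa [this] at hs
        · intro i hik
          have := Nat.find_min h (show i + 1 < Nat.find h by omega)
          have harg : a + ((i + 1 : Nat) : Int) = (a + 1) + (i : Int) := by push_cast; omega
          rwa [harg] at this
      rw [ih (a + 1) b h' (by omega) (by rw [hfind']; omega)]
      rw [hfind', hk]
      congr 1
      push_cast
      omega

-- ===== VERDICT (by name: the statement is the Claim_ definition above) =====
theorem others_label_py_spec : Claim_equal_others_label_py := by
  intro labels _
  unfold Spec_others_label_py
  simp only [others_label_py, others_label_py_alt]
  by_cases hb : labels.contains "Others" = true
  · have hbm : "Others" ∈ labels := by simpa using hb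
    rw [if_neg (by simp [hbm])]
    have hfst : (labels.foldl pvScanB (false, PySem.Set.empty)).1 = true := by
      rw [pv_scan_fst]; simp [hbm]
    rw [hfst]
    simp only [Bool.not_true, Bool.false_eq_true, if_false]
    have hex : ∃ j : Nat, pvCandA (1 + (j : Int)) ∉ labels := by
      by_contra hno
      simp only [not_exists, not_not] at hno
      have := pv_pigeonStr labels labels.length (fun j _ => hno j)
      omega
    set U := (labels.foldl pvScanB (false, PySem.Set.empty)).2 with hU
    have hUnodup : U.Nodup := pv_scan_snd_nodup labels false PySem.Set.empty List.nodup_nil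
    set m := Nat.find hex with hm
    have bound2 : m ≤ labels.length := by
      by_contra hgt
      rw [not_le] at hgt
      refine absurd (pv_pigeonStr labels labels.length ?_) (by omega)
      intro j hj
      simpa using Nat.find_min hex (show j < m by omega)
    have bound1 : m ≤ U.length := by
      by_contra hgt
      rw [not_le] at hgt
      refine absurd (pv_pigeonInt U hUnodup U.length ?_) (by omega)
      intro j hj
      have hmem : pvCandA (1 + (j : Int)) ∈ labels := by
        simpa using Nat.find_min hex (show j < m by omega)
      exact pv_used_sup labels _ (by omega) hmem
    rw [pv_loopA_eq labels (labels.length + 1) 1 hex (by omega)]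
    have hnotU : (1 + (m : Int)) ∉ U := by
      intro hmem
      exact (Nat.find_spec hex) (pv_used_sub labels _ hmem)
    have hq : ∃ j : Nat, (fun n => !(PySem.Set.contains U n)) (1 + (j : Int)) = true := by
      refine ⟨m, ?_⟩
      simp at hnotU ⊢
      simpa using hnotU
    have hfq : Nat.find hq = m := by
      rw [Nat.find_eq_iff]
      constructor
      · simp only [Bool.not_eq_true']
        rw [← Bool.not_eq_true]
        simpa [PySem.Set.contains_iff] using hnotU
      · intro i him
        have hmem : pvCandA (1 + (i : Int)) ∈ labels := by
          simpa using Nat.find_min hex him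
        have hiU : (1 + (i : Int)) ∈ U := pv_used_sup labels _ (by omega) hmem
        simp [hiU]
    rw [pv_findRange_eq (fun n => !(PySem.Set.contains U n))
      (((U.length : Int) + 2 - 1).toNat) 1 ((U.length : Int) + 2) hq rfl
      (by rw [hfq]; omega)]
    rw [hfq]
    rfl
  · have hbm : "Others" ∉ labels := by simpa using hb
    rw [if_pos (by simp [hbm])]
    have hfst : (labels.foldl pvScanB (false, PySem.Set.empty)).1 = false := by
      rw [pv_scan_fst]; simp [hbm]
    rw [hfst]
    simp
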